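-- pv_equiv track=rewrite | github.com/Ace1928/eidosian_forge | archive_forge/code/func_fermat_coords.py | fermat_coords
-- ===== SOURCE A (Python) =====
-- def fermat_coords(n: int) -> list[int] | None:
--     """If n can be factored in terms of Fermat primes with
--     multiplicity of each being 1, return those primes, else
--     None
--     """
--     primes = []
--     for p in [3, 5, 17, 257, 65537]:
--         quotient, remainder = divmod(n, p)
--         if remainder == 0:
--             n = quotient
--             primes.append(p)
--             if n == 1:
--                 return primes
--     return None
-- ===== SOURCE B (Python) =====
-- _FERMAT_PRIMES = (3, 5, 17, 257, 65537)
-- _F = 4294967295  # 2**32 - 1 = product of the five known Fermat primes (squarefree)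
--
-- def fermat_coords(n: int) -> list[int] | None:
--     if n <= 1 or _F % n != 0:
--         return None
--     return [p for p in _FERMAT_PRIMES if n % p == 0]
-- ===== Notes on version B (the rewrite author's own statement) =====
-- stated objective: simpler
-- what changed: A's sequential divide-and-reduce loop with early exit is replaced by a single divisibility test of n against the squarefree constant 4294967295 = 3*5*17*257*65537 followed by one read-off filter of the dividing primes.
import Mathlib
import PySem

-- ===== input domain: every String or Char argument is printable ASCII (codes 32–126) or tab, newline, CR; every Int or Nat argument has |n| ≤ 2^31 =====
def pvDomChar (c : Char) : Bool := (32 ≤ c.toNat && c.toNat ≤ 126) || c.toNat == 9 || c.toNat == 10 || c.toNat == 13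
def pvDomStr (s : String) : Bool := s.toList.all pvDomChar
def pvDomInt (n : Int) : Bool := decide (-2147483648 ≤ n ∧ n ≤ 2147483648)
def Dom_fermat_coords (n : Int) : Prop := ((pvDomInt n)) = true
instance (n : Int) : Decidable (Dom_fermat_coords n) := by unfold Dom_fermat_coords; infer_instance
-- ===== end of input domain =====

-- B replaces A's sequential divide-and-reduce loop by one divisibility test against the
-- squarefree constant 4294967295 = 3*5*17*257*65537 plus a read-off filter (objective: simpler).

-- ===== PORT A =====
-- the for-loop over [3,5,17,257,65537] with the mutated state (n, primes)
def fermatLoopA (n : Int) (primes : List Int) : List Int → Option (List Int)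
  | [] => none
  | p :: rest =>
    let quotient := PySem.Int.floordiv n p
    let remainder := PySem.Int.mod n p
    if remainder = 0 then
      if quotient = 1 then some (primes ++ [p])
      else fermatLoopA quotient (primes ++ [p]) rest
    else fermatLoopA n primes rest

def fermat_coords (n : Int) : Option (List Int) :=
  fermatLoopA n [] [3, 5, 17, 257, 65537]

-- ===== PORT B =====
def fermat_coords_alt (n : Int) : Option (List Int) :=
  if n ≤ 1 then none
  else if PySem.Int.mod 4294967295 n ≠ 0 then none
  else some (([3, 5, 17, 257, 65537] : List Int).filter (fun p => PySem.Int.mod n p == 0))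

-- ===== PRECONDITION & SPEC =====
def Spec_fermat_coords (n : Int) (out : Option (List Int)) : Prop := out = fermat_coords_alt n
instance (n : Int) (out : Option (List Int)) : Decidable (Spec_fermat_coords n out) := by unfold Spec_fermat_coords; infer_instance

-- ===== CLAIM (what is proved, stated in full; the proofs are below) =====
def Claim_equal_fermat_coords : Prop := ∀ (n : Int), Dom_fermat_coords n → Spec_fermat_coords n (fermat_coords n)

-- ===== LEMMAS AND PROOFS =====

-- A's loop over a list of pairwise-coprime primes ≥ 2 returns `some` exactly on the
-- divisors (> 1) of the product, and then lists precisely the dividing primes.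
theorem fermatLoopA_char (ps : List Int) (hp : ∀ p ∈ ps, 2 ≤ p ∧ Prime p)
    (hd : ps.Pairwise (fun a b => IsCoprime a b)) (m : Int) (acc : List Int) :
    fermatLoopA m acc ps =
      if 1 < m ∧ m ∣ ps.prod then some (acc ++ ps.filter (fun p => decide (p ∣ m))) else none := by
  induction ps generalizing m acc with
  | nil =>
    rw [fermatLoopA, if_neg]
    rintro ⟨h1, h2⟩
    have := Int.le_of_dvd one_pos (by simpa using h2)
    omega
  | cons p rest ih =>
    obtain ⟨hp2, hpp⟩ := hp p (List.mem_cons_self)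
    have hprest : ∀ q ∈ rest, 2 ≤ q ∧ Prime q := fun q hq => hp q (List.mem_cons_of_mem _ hq)
    have hcop : ∀ q ∈ rest, IsCoprime p q := fun q hq => (List.pairwise_cons.mp hd).1 q hq
    have hdrest : rest.Pairwise (fun a b => IsCoprime a b) := (List.pairwise_cons.mp hd).2
    have hRpos : 0 < rest.prod := List.prod_pos (fun q hq => by have := (hprest q hq).1; omega)
    have hp0 : p ≠ 0 := by omega
    simp only [fermatLoopA]
    by_cases hmod : PySem.Int.mod m p = 0
    · -- p divides m; the loop divides it out
      have hdvd : p ∣ m := (PySem.Int.mod_eq_zero_iff_dvd m p).mp hmod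
      have hm : PySem.Int.floordiv m p * p = m := by
        have h := PySem.Int.floordiv_mul_add_mod m p
        rw [hmod, add_zero] at h
        exact h
      set q := PySem.Int.floordiv m p with hq
      rw [if_pos hmod]
      by_cases hq1 : q = 1
      · -- m = p itself: the loop returns early with acc ++ [p]
        rw [hq1, one_mul] at hm
        rw [if_pos hq1, if_pos ⟨by omega, by rw [List.prod_cons, ← hm]; exact dvd_mul_right p rest.prod⟩]
        congr 1
        rw [List.filter_cons_of_pos (by simp [← hm]), List.filter_eq_nil_iff.mpr]
        intro q' hq'
        simp only [decide_eq_true_eq]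
        intro hq'p
        rw [← hm] at hq'p
        have : IsCoprime q' q' := IsCoprime.of_isCoprime_of_dvd_right ((hcop q' hq').symm) hq'p
        rcases Int.isUnit_iff.mp (isCoprime_self.mp this) with h | h <;>
          have := (hprest q' hq').1 <;> omega
      · rw [if_neg hq1, ih hprest hdrest]
        have hiff : (1 < q ∧ q ∣ rest.prod) ↔ (1 < m ∧ m ∣ (p :: rest).prod) := by
          rw [List.prod_cons]
          constructor
          · rintro ⟨h1, h2⟩
            refine ⟨by nlinarith, ?_⟩
            rw [← hm, mul_comm p rest.prod]
            exact mul_dvd_mul_right h2 p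
          · rintro ⟨h1, h2⟩
            have hqpos : 1 < q := by
              rcases lt_trichotomy q 1 with h | h | h
              · exfalso; nlinarith
              · exact absurd h hq1
              · exact h
            refine ⟨hqpos, ?_⟩
            rw [← hm, mul_comm p rest.prod] at h2
            exact (mul_dvd_mul_iff_right hp0).mp h2
        have hfilter : rest.filter (fun q' => decide (q' ∣ q)) = rest.filter (fun q' => decide (q' ∣ m)) := by
          refine List.filter_congr (fun q' hq' => ?_)
          simp only [decide_eq_decide]
          constructor
          · intro h; rw [← hm]; exact h.mul_right p
          · intro h
            rw [← hm] at h
            exact ((hcop q' hq').symm.dvd_of_dvd_mul_right) h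
        by_cases hcond : 1 < q ∧ q ∣ rest.prod
        · rw [if_pos hcond, if_pos (hiff.mp hcond)]
          rw [List.filter_cons_of_pos (by simpa using hdvd), hfilter, List.append_assoc,
            List.singleton_append]
        · rw [if_neg hcond, if_neg (fun h => hcond (hiff.mpr h))]
    · -- p does not divide m; the loop skips p
      have hndvd : ¬ p ∣ m := fun h => hmod ((PySem.Int.mod_eq_zero_iff_dvd m p).mpr h)
      rw [if_neg hmod, ih hprest hdrest]
      have hiff : (1 < m ∧ m ∣ rest.prod) ↔ (1 < m ∧ m ∣ (p :: rest).prod) := by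
        rw [List.prod_cons]
        constructor
        · rintro ⟨h1, h2⟩; exact ⟨h1, h2.mul_left p⟩
        · rintro ⟨h1, h2⟩
          have hcpm : IsCoprime p m := (Prime.coprime_iff_not_dvd hpp).mpr hndvd
          exact ⟨h1, hcpm.symm.dvd_of_dvd_mul_left h2⟩
      by_cases hc : 1 < m ∧ m ∣ rest.prod
      · rw [if_pos hc, if_pos (hiff.mp hc)]
        rw [List.filter_cons_of_neg (by simpa using hndvd)]
      · rw [if_neg hc, if_neg (fun h => hc (hiff.mpr h))]

-- the five Fermat primes are primes ≥ 2 and pairwise coprime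
theorem fermat_primes_facts :
    (∀ p ∈ ([3, 5, 17, 257, 65537] : List Int), 2 ≤ p ∧ Prime p) ∧
    ([3, 5, 17, 257, 65537] : List Int).Pairwise (fun a b => IsCoprime a b) := by
  constructor
  · intro p hp
    rcases (by simpa using hp : p = 3 ∨ p = 5 ∨ p = 17 ∨ p = 257 ∨ p = 65537) with h|h|h|h|h <;>
      subst h <;> exact ⟨by norm_num, by norm_num⟩
  · refine List.Pairwise.cons ?_ (List.Pairwise.cons ?_ (List.Pairwise.cons ?_
      (List.Pairwise.cons ?_ (List.pairwise_singleton _ _)))) <;>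
      intro b hb <;> rw [Int.isCoprime_iff_gcd_eq_one] <;> fin_cases hb <;> decide

-- ===== VERDICT (by name: the statement is the Claim_ definition above) =====
theorem fermat_coords_spec : Claim_equal_fermat_coords := by
  intro n _
  unfold Spec_fermat_coords fermat_coords fermat_coords_alt
  obtain ⟨hp, hd⟩ := fermat_primes_facts
  rw [fermatLoopA_char _ hp hd]
  have hprod : ([3, 5, 17, 257, 65537] : List Int).prod = 4294967295 := by decide
  rw [hprod, List.nil_append]
  by_cases h1 : n ≤ 1
  · rw [if_pos h1, if_neg (fun h => by omega)]
  · rw [if_neg h1]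
    by_cases hdvd : n ∣ 4294967295
    · rw [if_pos ⟨by omega, hdvd⟩,
        if_neg (by simpa using (PySem.Int.mod_eq_zero_iff_dvd 4294967295 n).mpr hdvd)]
      congr 1
      refine List.filter_congr (fun p hp => ?_)
      by_cases h : p ∣ n
      · simp [h, (PySem.Int.mod_eq_zero_iff_dvd n p).mpr h]
      · have hne : PySem.Int.mod n p ≠ 0 := fun hm => h ((PySem.Int.mod_eq_zero_iff_dvd n p).mp hm)
        simp [h, hne]
    · rw [if_neg (fun h => hdvd h.2), if_pos]
      exact fun h => hdvd ((PySem.Int.mod_eq_zero_iff_dvd 4294967295 n).mp h)
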